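-- pv_equiv track=rewrite | github.com/zmfpdl64/Programers_code_test | 프로그래머스/1단계/약수의 개수와 덧셈.py | even
-- ===== SOURCE A (Python) =====
-- def even(n):
--     check = 0
--     for i in range(n, 0, -1):
--         if n % i == 0:
--             check += 1
--     if check % 2 == 0:
--         return 1
--     else:
--         return 0
-- ===== SOURCE B (Python) =====
-- def even(n):
--     if n <= 0:
--         return 1
--     i = 1
--     while i * i < n:
--         i += 1
--     return 0 if i * i == n else 1
-- ===== Notes on version B (the rewrite author's own statement) =====
-- stated objective: faster
-- what changed: Replaces the O(n) divisor-counting loop by an O(sqrt(n)) integer-square-root search: the divisor count is odd exactly when n is a perfect square.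
import Mathlib
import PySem

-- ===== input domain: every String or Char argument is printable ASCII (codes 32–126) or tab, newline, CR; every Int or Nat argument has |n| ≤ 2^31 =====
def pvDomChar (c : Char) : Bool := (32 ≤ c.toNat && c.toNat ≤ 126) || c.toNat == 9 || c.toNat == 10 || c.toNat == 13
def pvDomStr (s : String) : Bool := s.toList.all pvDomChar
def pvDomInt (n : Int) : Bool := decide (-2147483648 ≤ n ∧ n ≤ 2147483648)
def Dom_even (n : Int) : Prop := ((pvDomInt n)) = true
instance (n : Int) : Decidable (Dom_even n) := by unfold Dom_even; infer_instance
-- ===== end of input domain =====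

-- B replaces A's divisor-counting loop by an integer-square-root search
-- (the divisor count of n > 0 is odd exactly when n is a perfect square).

-- ===== PORT A =====
def even (n : Int) : Int :=
  let check := (PySem.List.pyRange n 0 (-1)).foldl
    (fun check i => if PySem.Int.mod n i = 0 then check + 1 else check) 0
  if PySem.Int.mod check 2 = 0 then 1 else 0

-- ===== PORT B =====
-- while i * i < n: i += 1   (returns the first i with i * i >= n)
def sqLoop (n i : Int) : Int :=
  if i * i < n then sqLoop n (i + 1) else i
termination_by (n - i).toNat
decreasing_by
  have h0 : 0 ≤ i * i := mul_self_nonneg i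
  have h1 : i < n := by
    rcases le_or_gt i 0 with h | h
    · omega
    · have : i * 1 ≤ i * i := mul_le_mul_of_nonneg_left (by omega) (by omega)
      omega
  omega

def even_alt (n : Int) : Int :=
  if n ≤ 0 then 1
  else if sqLoop n 1 * sqLoop n 1 = n then 0 else 1

-- ===== PRECONDITION & SPEC =====
def Spec_even (n : Int) (out : Int) : Prop := out = even_alt n
instance (n : Int) (out : Int) : Decidable (Spec_even n out) := by unfold Spec_even; infer_instance

-- ===== CLAIM (what is proved, stated in full; the proofs are below) =====
def Claim_equal_even : Prop := ∀ (n : Int), Dom_even n → Spec_even n (even n)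

-- ===== LEMMAS AND PROOFS =====

-- list count over range as a Finset cardinality
theorem card_filter_range_eq_countP (p : Nat → Bool) (m : Nat) :
    ((Finset.range m).filter (fun k => p k)).card = (List.range m).countP p := by
  induction m with
  | zero => simp
  | succ m ih =>
    rw [Finset.range_add_one, Finset.filter_insert, List.range_succ, List.countP_append]
    by_cases h : p m
    · rw [if_pos h, Finset.card_insert_of_notMem (by simp), ih]; simp [h]
    · rw [if_neg h, ih]; simp [h]

-- the divisors below sqrt m biject with the divisors above sqrt m  (d ↦ m / d)
theorem card_small_eq_card_large (m : Nat) (hm : 0 < m) :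
    (m.divisors.filter (fun d => d * d < m)).card
      = (m.divisors.filter (fun d => m < d * d)).card := by
  apply Finset.card_bij' (fun d _ => m / d) (fun e _ => m / e)
  · intro d hd
    rw [Finset.mem_filter, Nat.mem_divisors] at hd
    obtain ⟨⟨hdvd, hne⟩, hlt⟩ := hd
    have hdpos : 0 < d := Nat.pos_of_dvd_of_pos hdvd hm
    have hprod : d * (m / d) = m := Nat.mul_div_cancel' hdvd
    have hlt2 : d < m / d := by
      apply Nat.lt_of_mul_lt_mul_left (a := d); omega
    rw [Finset.mem_filter, Nat.mem_divisors]
    refine ⟨⟨Nat.div_dvd_of_dvd hdvd, hne⟩, ?_⟩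
    have h4 : (m / d) * (d + 1) ≤ (m / d) * (m / d) :=
      Nat.mul_le_mul_left _ (by omega)
    have h5 : (m / d) * (d + 1) = (m / d) * d + (m / d) := by ring
    have h6 : (m / d) * d = m := by rw [Nat.mul_comm]; exact hprod
    omega
  · intro e he
    rw [Finset.mem_filter, Nat.mem_divisors] at he
    obtain ⟨⟨hdvd, hne⟩, hlt⟩ := he
    have hepos : 0 < e := Nat.pos_of_dvd_of_pos hdvd hm
    have hprod : e * (m / e) = m := Nat.mul_div_cancel' hdvd
    have hlt2 : m / e < e := by
      by_contra hc
      have h4 : e * e ≤ e * (m / e) := Nat.mul_le_mul_left _ (by omega)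
      omega
    have h3 : 0 < m / e := Nat.div_pos (Nat.le_of_dvd hm hdvd) hepos
    rw [Finset.mem_filter, Nat.mem_divisors]
    refine ⟨⟨Nat.div_dvd_of_dvd hdvd, hne⟩, ?_⟩
    have h4 : (m / e) * (m / e + 1) ≤ (m / e) * e := Nat.mul_le_mul_left _ (by omega)
    have h5 : (m / e) * (m / e + 1) = (m / e) * (m / e) + (m / e) := by ring
    have h6 : (m / e) * e = m := by rw [Nat.mul_comm]; exact hprod
    omega
  · intro d hd
    rw [Finset.mem_filter, Nat.mem_divisors] at hd
    exact Nat.div_div_self hd.1.1 (by omega)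
  · intro e he
    rw [Finset.mem_filter, Nat.mem_divisors] at he
    exact Nat.div_div_self he.1.1 (by omega)

-- the "exact square root" class of divisors: one element if m is a square, none otherwise
theorem card_mid_of_isSquare (m : Nat) (hm : 0 < m) (h : IsSquare m) :
    (m.divisors.filter (fun d => d * d = m)).card = 1 := by
  obtain ⟨k, hk⟩ := h
  have heq : m.divisors.filter (fun d => d * d = m) = {k} := by
    ext d
    rw [Finset.mem_filter, Nat.mem_divisors, Finset.mem_singleton]
    constructor
    · rintro ⟨_, hdd⟩
      exact Nat.mul_self_inj.mp (by rw [hdd, hk])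
    · intro h
      rw [h]
      exact ⟨⟨⟨k, hk⟩, by omega⟩, hk.symm⟩
  rw [heq, Finset.card_singleton]

theorem card_mid_of_not_isSquare (m : Nat) (h : ¬ IsSquare m) :
    (m.divisors.filter (fun d => d * d = m)).card = 0 := by
  rw [Finset.card_eq_zero]
  apply Finset.filter_eq_empty_iff.mpr
  intro d _ hdd
  exact h ⟨d, hdd.symm⟩

-- three-way split of the divisor set
theorem card_divisors_split (m : Nat) :
    m.divisors.card
      = (m.divisors.filter (fun d => d * d < m)).card
        + (m.divisors.filter (fun d => d * d = m)).card
        + (m.divisors.filter (fun d => m < d * d)).card := by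
  classical
  have h1 := Finset.card_filter_add_card_filter_not
    (s := m.divisors) (p := fun d => d * d < m)
  have h2 := Finset.card_filter_add_card_filter_not
    (s := m.divisors.filter (fun d => ¬ d * d < m)) (p := fun d => d * d = m)
  rw [Finset.filter_filter, Finset.filter_filter] at h2
  have e1 : m.divisors.filter (fun d => ¬ d * d < m ∧ d * d = m)
      = m.divisors.filter (fun d => d * d = m) := by
    apply Finset.filter_congr; intro d _; constructor
    · intro h; exact h.2
    · intro h; exact ⟨by omega, h⟩
  have e2 : m.divisors.filter (fun d => ¬ d * d < m ∧ ¬ d * d = m)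
      = m.divisors.filter (fun d => m < d * d) := by
    apply Finset.filter_congr; intro d _; constructor
    · intro h; omega
    · intro h; omega
  rw [e1, e2] at h2
  omega

theorem parity_of_square (m : Nat) (hm : 0 < m) (h : IsSquare m) :
    m.divisors.card % 2 = 1 := by
  have hs := card_divisors_split m
  rw [card_small_eq_card_large m hm, card_mid_of_isSquare m hm h] at hs
  omega

theorem parity_of_not_square (m : Nat) (hm : 0 < m) (h : ¬ IsSquare m) :
    m.divisors.card % 2 = 0 := by
  have hs := card_divisors_split m
  rw [card_small_eq_card_large m hm, card_mid_of_not_isSquare m h] at hs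
  omega

-- A's loop count equals the number of divisors of n.toNat (for n > 0)
theorem countA_eq_card_divisors (n : Int) (hn : 0 < n) :
    ((List.range n.toNat).map (fun k : Nat => n - (k : Int))).countP
        (fun i => decide (PySem.Int.mod n i = 0))
      = (n.toNat).divisors.card := by
  rw [List.countP_map]
  have hcomp : ((fun i => decide (PySem.Int.mod n i = 0)) ∘ fun k : Nat => n - (k : Int))
      = fun k : Nat => decide (PySem.Int.mod n (n - (k : Int)) = 0) := rfl
  rw [hcomp, ← card_filter_range_eq_countP]
  symm
  apply Finset.card_bij' (fun d _ => n.toNat - d) (fun k _ => n.toNat - k)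
  · intro d hd
    rw [Nat.mem_divisors] at hd
    obtain ⟨hdvd, hne⟩ := hd
    have hdpos : 0 < d := Nat.pos_of_dvd_of_pos hdvd (by omega)
    have hdle : d ≤ n.toNat := Nat.le_of_dvd (by omega) hdvd
    rw [Finset.mem_filter, Finset.mem_range]
    refine ⟨by omega, ?_⟩
    simp only [decide_eq_true_eq, PySem.Int.mod_eq_zero_iff_dvd]
    have he : n - ((n.toNat - d : Nat) : Int) = (d : Int) := by omega
    rw [he]
    have hdvd' : (d : Int) ∣ ((n.toNat : Nat) : Int) := Int.natCast_dvd_natCast.mpr hdvd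
    have hnn : ((n.toNat : Nat) : Int) = n := by omega
    rwa [hnn] at hdvd'
  · intro k hk
    rw [Finset.mem_filter, Finset.mem_range] at hk
    obtain ⟨hklt, hp⟩ := hk
    simp only [decide_eq_true_eq, PySem.Int.mod_eq_zero_iff_dvd] at hp
    have he : n - (k : Int) = ((n.toNat - k : Nat) : Int) := by omega
    rw [he] at hp
    rw [Nat.mem_divisors]
    constructor
    · have hnn : n = ((n.toNat : Nat) : Int) := by omega
      rw [hnn] at hp
      exact_mod_cast hp
    · omega
  · intro d hd
    rw [Nat.mem_divisors] at hd
    have : d ≤ n.toNat := Nat.le_of_dvd (by omega) hd.1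
    omega
  · intro k hk
    rw [Finset.mem_filter, Finset.mem_range] at hk
    omega

-- B's loop: the result is at least its start, and every index passed over has square below n
theorem sqLoop_start_le (n i : Int) : i ≤ sqLoop n i := by
  fun_induction sqLoop with
  | case1 i h ih => omega
  | case2 i h => omega

theorem sqLoop_sq_ge (n i : Int) : n ≤ sqLoop n i * sqLoop n i := by
  fun_induction sqLoop with
  | case1 i h ih => exact ih
  | case2 i h => omega

theorem sqLoop_min (n i : Int) : ∀ j, i ≤ j → j < sqLoop n i → j * j < n := by
  fun_induction sqLoop with
  | case1 i h ih =>
    intro j hij hjr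
    rcases eq_or_lt_of_le hij with rfl | hlt
    · exact h
    · exact ih j (by omega) hjr
  | case2 i h => intro j hij hjr; omega

theorem sqLoop_eq_iff_isSquare (n : Int) (hn : 1 ≤ n) :
    sqLoop n 1 * sqLoop n 1 = n ↔ IsSquare n := by
  constructor
  · intro h; exact ⟨sqLoop n 1, h.symm⟩
  · rintro ⟨k, hk⟩
    have hk' : (k.natAbs : Int) * (k.natAbs : Int) = n := by
      have := Int.natAbs_mul_self (a := k)
      omega
    set a : Int := (k.natAbs : Int) with ha
    have ha1 : 1 ≤ a := by
      rcases Nat.eq_zero_or_pos k.natAbs with h0 | h0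
      · rw [ha, h0] at hk'; omega
      · omega
    have hge := sqLoop_sq_ge n 1
    have hle : sqLoop n 1 ≤ a := by
      by_contra hc
      have hca : a < sqLoop n 1 := by omega
      have := sqLoop_min n 1 a ha1 hca
      omega
    have h1 : 1 ≤ sqLoop n 1 := sqLoop_start_le n 1
    have hmul : sqLoop n 1 * sqLoop n 1 ≤ a * a :=
      mul_le_mul hle hle (by omega) (by omega)
    omega

-- IsSquare transfers between Int and Nat for positive n
theorem isSquare_int_iff_nat (n : Int) (hn : 1 ≤ n) :
    IsSquare n ↔ IsSquare n.toNat := by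
  constructor
  · rintro ⟨r, rfl⟩
    exact ⟨r.natAbs, by have := Int.natAbs_mul_self (a := r); omega⟩
  · rintro ⟨r, hr⟩
    refine ⟨(r : Int), ?_⟩
    have : ((r * r : Nat) : Int) = (r : Int) * (r : Int) := by push_cast; ring
    omega

theorem even_eq_even_alt (n : Int) : even n = even_alt n := by
  by_cases hn : n ≤ 0
  · rw [even, even_alt, if_pos hn, PySem.List.pyRange_neg_one_eq_nil (by omega)]
    simp [PySem.Int.mod]
  · have hn' : 0 < n := by omega
    have hcount := PySem.List.foldl_count_if
      (fun i => decide (PySem.Int.mod n i = 0)) (PySem.List.pyRange n 0 (-1)) 0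
    simp only [decide_eq_true_eq] at hcount
    have hrange : PySem.List.pyRange n 0 (-1)
        = (List.range n.toNat).map (fun k : Nat => n - (k : Int)) := by
      rw [PySem.List.pyRange_neg_one]
      have : (n - 0).toNat = n.toNat := by omega
      rw [this]
    rw [even, even_alt, if_neg hn, hcount, hrange]
    rw [countA_eq_card_divisors n hn', zero_add]
    rw [PySem.Int.mod_eq_emod_of_pos (by omega : (0:Int) < 2)]
    by_cases hsq : IsSquare n.toNat
    · have hpar := parity_of_square n.toNat (by omega) hsq
      have hb : sqLoop n 1 * sqLoop n 1 = n :=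
        (sqLoop_eq_iff_isSquare n (by omega)).mpr
          ((isSquare_int_iff_nat n (by omega)).mpr hsq)
      rw [if_pos hb, if_neg (by omega)]
    · have hpar := parity_of_not_square n.toNat (by omega) hsq
      have hb : ¬ (sqLoop n 1 * sqLoop n 1 = n) := by
        intro hc
        exact hsq ((isSquare_int_iff_nat n (by omega)).mp
          ((sqLoop_eq_iff_isSquare n (by omega)).mp hc))
      rw [if_neg hb, if_pos (by omega)]

-- ===== VERDICT (by name: the statement is the Claim_ definition above) =====
theorem even_spec : Claim_equal_even := by
  intro n _
  unfold Spec_even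
  exact even_eq_even_alt n
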